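-- pv_equiv track=rewrite | github.com/gazzar1/nxentra-register | backend/projections/views.py | _line_matches_dimension_filters
-- ===== SOURCE A (Python) =====
-- def _line_matches_dimension_filters(
--     analysis_tags, dim_filter_map,
--     dim_public_id_to_code, value_public_id_to_code
-- ):
--     """Check if a journal line's analysis tags match dimension filters."""
--     if not dim_filter_map:
--         return True
--
--     line_dims = {}
--     for tag in analysis_tags:
--         dim_code = tag.get("dimension_code")
--         value_code = tag.get("value_code")
--
--         if not dim_code:
--             dim_public_id = tag.get("dimension_public_id")
--             if dim_public_id:
--                 dim_code = dim_public_id_to_code.get(str(dim_public_id))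
--
--         if not value_code:
--             value_public_id = tag.get("value_public_id")
--             if value_public_id:
--                 value_code = value_public_id_to_code.get(str(value_public_id))
--
--         if dim_code and value_code:
--             line_dims[dim_code] = value_code
--
--     for dim_code, range_filter in dim_filter_map.items():
--         code_from = range_filter.get("from", "")
--         code_to = range_filter.get("to", "")
--
--         if dim_code not in line_dims:
--             return False
--
--         value_code = line_dims[dim_code]
--         if code_from and value_code < code_from:
--             return False
--         if code_to and value_code > code_to:
--             return False
--
--     return True
-- ===== SOURCE B (Python) =====
-- def _line_matches_dimension_filters(
--     analysis_tags, dim_filter_map,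
--     dim_public_id_to_code, value_public_id_to_code
-- ):
--     """Check if a journal line's analysis tags match dimension filters."""
--
--     def code(tag, key, pid_key, pid_map):
--         c = tag.get(key)
--         if c:
--             return c
--         pid = tag.get(pid_key)
--         return pid_map.get(str(pid)) if pid else None
--
--     def found(dim_code):
--         # last-wins = first match scanning the tags backwards
--         for tag in reversed(analysis_tags):
--             d = code(tag, "dimension_code", "dimension_public_id",
--                      dim_public_id_to_code)
--             v = code(tag, "value_code", "value_public_id",
--                      value_public_id_to_code)
--             if d == dim_code and d and v:
--                 return v
--         return None
--
--     return all(
--         (v := found(dim_code)) is not None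
--         and (not rf.get("from", "") or v >= rf.get("from", ""))
--         and (not rf.get("to", "") or v <= rf.get("to", ""))
--         for dim_code, rf in dim_filter_map.items()
--     )
-- ===== Notes on version B (the rewrite author's own statement) =====
-- stated objective: alternative
-- what changed: Drops the pre-built line_dims dict: for each required dimension B scans the tags in reverse and takes the first resolved match (= A's dict last-wins), using one shared code-resolution helper and a single combined boolean for the range bounds instead of A's early-return ifs.
import Mathlib
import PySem

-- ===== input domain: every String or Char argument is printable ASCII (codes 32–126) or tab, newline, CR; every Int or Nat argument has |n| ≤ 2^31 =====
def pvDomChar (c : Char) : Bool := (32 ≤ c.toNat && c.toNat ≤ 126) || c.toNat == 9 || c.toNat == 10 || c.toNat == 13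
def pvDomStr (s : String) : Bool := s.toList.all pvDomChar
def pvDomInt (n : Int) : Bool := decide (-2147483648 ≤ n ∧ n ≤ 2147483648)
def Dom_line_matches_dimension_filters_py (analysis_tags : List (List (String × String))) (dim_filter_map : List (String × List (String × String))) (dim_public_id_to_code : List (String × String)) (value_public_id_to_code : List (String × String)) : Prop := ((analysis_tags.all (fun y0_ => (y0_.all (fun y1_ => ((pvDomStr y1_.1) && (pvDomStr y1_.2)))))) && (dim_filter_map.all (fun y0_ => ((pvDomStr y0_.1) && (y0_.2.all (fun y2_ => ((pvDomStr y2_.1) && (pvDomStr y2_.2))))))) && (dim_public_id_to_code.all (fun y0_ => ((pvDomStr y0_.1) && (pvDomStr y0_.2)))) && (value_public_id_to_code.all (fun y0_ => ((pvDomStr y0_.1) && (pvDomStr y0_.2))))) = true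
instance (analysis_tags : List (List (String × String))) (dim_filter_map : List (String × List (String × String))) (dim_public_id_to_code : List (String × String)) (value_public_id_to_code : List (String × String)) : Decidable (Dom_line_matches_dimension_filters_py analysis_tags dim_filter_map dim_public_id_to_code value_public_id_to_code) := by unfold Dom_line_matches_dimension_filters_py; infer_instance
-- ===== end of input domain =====

-- B drops the pre-built line_dims dict: per required dimension it scans the tags in
-- reverse and takes the first resolved match (alternative decomposition, not claimed faster).
-- ===== PORT A =====
-- Python truthiness of an Optional[str]
def pvTruthy : Option String → Bool
  | some s => !(s == "")
  | none => false

-- resolution of one tag, exactly as A's first loop body computes it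
def pvResolveA (tag : List (String × String)) (dim_public_id_to_code : List (String × String)) (value_public_id_to_code : List (String × String)) : Option (String × String) :=
  let dc0 := List.lookup "dimension_code" tag
  let vc0 := List.lookup "value_code" tag
  let dc := if pvTruthy dc0 then dc0 else
    match List.lookup "dimension_public_id" tag with
    | some pid => if pvTruthy (some pid) then List.lookup pid dim_public_id_to_code else dc0
    | none => dc0
  let vc := if pvTruthy vc0 then vc0 else
    match List.lookup "value_public_id" tag with
    | some pid => if pvTruthy (some pid) then List.lookup pid value_public_id_to_code else vc0
    | none => vc0
  if pvTruthy dc && pvTruthy vc then some (dc.getD "", vc.getD "") else none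

-- A's second loop body: the two early-return range checks
def pvRangeOkA (vc? : Option String) (range_filter : List (String × String)) : Bool :=
  let code_from := (List.lookup "from" range_filter).getD ""
  let code_to := (List.lookup "to" range_filter).getD ""
  match vc? with
  | none => false
  | some value_code =>
    if pvTruthy (some code_from) && decide (value_code < code_from) then false
    else if pvTruthy (some code_to) && decide (code_to < value_code) then false
    else true

-- A's second loop: early-return recursion over the filter items
def pvCheckFiltersA (line_dims : PySem.Dict String String) : List (String × List (String × String)) → Bool
  | [] => true
  | (dim_code, range_filter) :: rest =>
    if pvRangeOkA (line_dims.get? dim_code) range_filter then pvCheckFiltersA line_dims rest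
    else false

def line_matches_dimension_filters_py (analysis_tags : List (List (String × String))) (dim_filter_map : List (String × List (String × String))) (dim_public_id_to_code : List (String × String)) (value_public_id_to_code : List (String × String)) : Bool :=
  if dim_filter_map.isEmpty then true
  else
    let line_dims : PySem.Dict String String :=
      analysis_tags.foldl (fun d tag =>
        match pvResolveA tag dim_public_id_to_code value_public_id_to_code with
        | some (k, v) => d.insert k v
        | none => d) PySem.Dict.empty
    pvCheckFiltersA line_dims dim_filter_map

-- ===== PORT B =====
-- Source B's shared `code` helper: direct code if truthy, else public-id map lookup
def pvCode (tag : List (String × String)) (key pidKey : String) (pidMap : List (String × String)) : Option String :=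
  let c := List.lookup key tag
  if c.getD "" ≠ "" then c
  else
    match List.lookup pidKey tag with
    | some pid => if pid ≠ "" then List.lookup pid pidMap else none
    | none => none

-- Source B's `found`: first match scanning the tags backwards
def pvFoundB (analysis_tags : List (List (String × String))) (dim_code : String) (dim_public_id_to_code : List (String × String)) (value_public_id_to_code : List (String × String)) : Option String :=
  analysis_tags.reverse.findSome? (fun tag =>
    match pvCode tag "dimension_code" "dimension_public_id" dim_public_id_to_code,
          pvCode tag "value_code" "value_public_id" value_public_id_to_code with
    | some d, some v => if d == dim_code && d ≠ "" && v ≠ "" then some v else none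
    | _, _ => none)

def line_matches_dimension_filters_py_alt (analysis_tags : List (List (String × String))) (dim_filter_map : List (String × List (String × String))) (dim_public_id_to_code : List (String × String)) (value_public_id_to_code : List (String × String)) : Bool :=
  dim_filter_map.all (fun p =>
    match pvFoundB analysis_tags p.1 dim_public_id_to_code value_public_id_to_code with
    | none => false
    | some v =>
      let f := (List.lookup "from" p.2).getD ""
      let t := (List.lookup "to" p.2).getD ""
      (f == "" || decide (f ≤ v)) && (t == "" || decide (v ≤ t)))

-- ===== PRECONDITION & SPEC =====
def Spec_line_matches_dimension_filters_py (analysis_tags : List (List (String × String))) (dim_filter_map : List (String × List (String × String))) (dim_public_id_to_code : List (String × String)) (value_public_id_to_code : List (String × String)) (out : Bool) : Prop := out = line_matches_dimension_filters_py_alt analysis_tags dim_filter_map dim_public_id_to_code value_public_id_to_code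
instance (analysis_tags : List (List (String × String))) (dim_filter_map : List (String × List (String × String))) (dim_public_id_to_code : List (String × String)) (value_public_id_to_code : List (String × String)) (out : Bool) : Decidable (Spec_line_matches_dimension_filters_py analysis_tags dim_filter_map dim_public_id_to_code value_public_id_to_code out) := by unfold Spec_line_matches_dimension_filters_py; infer_instance

-- ===== CLAIM (what is proved, stated in full; the proofs are below) =====
def Claim_equal_line_matches_dimension_filters_py : Prop := ∀ (analysis_tags : List (List (String × String))) (dim_filter_map : List (String × List (String × String))) (dim_public_id_to_code : List (String × String)) (value_public_id_to_code : List (String × String)), Dom_line_matches_dimension_filters_py analysis_tags dim_filter_map dim_public_id_to_code value_public_id_to_code → Spec_line_matches_dimension_filters_py analysis_tags dim_filter_map dim_public_id_to_code value_public_id_to_code (line_matches_dimension_filters_py analysis_tags dim_filter_map dim_public_id_to_code value_public_id_to_code)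

-- ===== LEMMAS AND PROOFS =====
-- B's per-tag match function for a given dimension code
def pvGB (dim_code : String) (dp vp : List (String × String)) (tag : List (String × String)) : Option String :=
  match pvCode tag "dimension_code" "dimension_public_id" dp,
        pvCode tag "value_code" "value_public_id" vp with
  | some d, some v => if d == dim_code && d ≠ "" && v ≠ "" then some v else none
  | _, _ => none

theorem pvFoundB_eq (tags : List (List (String × String))) (dim_code : String) (dp vp : List (String × String)) :
    pvFoundB tags dim_code dp vp = tags.reverse.findSome? (pvGB dim_code dp vp) := rfl

-- truthiness normalisation: a falsy Option String (none or some "") becomes none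
def pvNorm : Option String → Option String
  | some s => if s = "" then none else some s
  | none => none

-- A's single-field resolution (the dc / vc let-bindings of pvResolveA), factored out
def pvResA1 (tag : List (String × String)) (key pidKey : String) (m : List (String × String)) : Option String :=
  let c := List.lookup key tag
  if pvTruthy c then c else
    match List.lookup pidKey tag with
    | some pid => if pvTruthy (some pid) then List.lookup pid m else c
    | none => c

theorem resolveA_split (tag dp vp : List (String × String)) :
    pvResolveA tag dp vp =
      (if pvTruthy (pvResA1 tag "dimension_code" "dimension_public_id" dp) &&
          pvTruthy (pvResA1 tag "value_code" "value_public_id" vp)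
       then some ((pvResA1 tag "dimension_code" "dimension_public_id" dp).getD "",
                  (pvResA1 tag "value_code" "value_public_id" vp).getD "")
       else none) := rfl

-- both resolutions normalise to the same option
theorem norm_code_eq (tag : List (String × String)) (key pidKey : String) (m : List (String × String)) :
    pvNorm (pvCode tag key pidKey m) = pvNorm (pvResA1 tag key pidKey m) := by
  unfold pvCode pvResA1 pvTruthy
  cases h1 : List.lookup key tag with
  | none =>
    cases h2 : List.lookup pidKey tag with
    | none => simp [pvNorm]
    | some pid => by_cases hp : pid = "" <;> simp [hp, pvNorm]
  | some c =>
    by_cases hc : c = ""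
    · cases h2 : List.lookup pidKey tag with
      | none => simp [hc, pvNorm]
      | some pid => by_cases hp : pid = "" <;> simp [hc, hp, pvNorm]
    · simp [hc, pvNorm]

-- B's per-tag match depends only on the normalised codes
theorem gB_norm (dim_code : String) (dp vp : List (String × String)) (tag : List (String × String)) :
    pvGB dim_code dp vp tag
      = (match pvNorm (pvCode tag "dimension_code" "dimension_public_id" dp),
               pvNorm (pvCode tag "value_code" "value_public_id" vp) with
         | some d, some v => if d == dim_code then some v else none
         | _, _ => none) := by
  unfold pvGB
  cases hd : pvCode tag "dimension_code" "dimension_public_id" dp with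
  | none => simp [pvNorm]
  | some d =>
    by_cases hdz : d = ""
    · simp only [hdz, pvNorm, if_pos]
      cases pvCode tag "value_code" "value_public_id" vp <;> simp
    · cases hv : pvCode tag "value_code" "value_public_id" vp with
      | none => simp [pvNorm, hdz]
      | some v =>
        by_cases hvz : v = "" <;> simp [pvNorm, hdz, hvz]

-- A's filtered resolution depends only on the normalised codes, the same way
theorem resolveA_norm (dim_code : String) (dp vp : List (String × String)) (tag : List (String × String)) :
    (match pvResolveA tag dp vp with
     | some (d, v) => if d == dim_code then some v else none
     | none => none)
      = (match pvNorm (pvResA1 tag "dimension_code" "dimension_public_id" dp),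
               pvNorm (pvResA1 tag "value_code" "value_public_id" vp) with
         | some d, some v => if d == dim_code then some v else none
         | _, _ => none) := by
  rw [resolveA_split]
  cases hd : pvResA1 tag "dimension_code" "dimension_public_id" dp with
  | none => simp [pvTruthy, pvNorm]
  | some d =>
    by_cases hdz : d = ""
    · simp only [pvTruthy, pvNorm, hdz, if_pos]
      cases pvResA1 tag "value_code" "value_public_id" vp <;> simp
    · cases hv : pvResA1 tag "value_code" "value_public_id" vp with
      | none => simp [pvTruthy, pvNorm, hdz]
      | some v =>
        by_cases hvz : v = "" <;> simp [pvTruthy, pvNorm, hdz, hvz]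

-- per tag, B's match agrees with filtering A's resolution by the dimension code
theorem gB_eq_resolveA (dim_code : String) (dp vp : List (String × String)) (tag : List (String × String)) :
    pvGB dim_code dp vp tag
      = (match pvResolveA tag dp vp with
         | some (d, v) => if d == dim_code then some v else none
         | none => none) := by
  rw [gB_norm, resolveA_norm, norm_code_eq, norm_code_eq]

-- a last-wins fold equals a first-match scan of the reversed list
theorem foldl_lastwins_eq_findSome_reverse {α β : Type} (g : α → Option β) :
    ∀ (l : List α) (acc : Option β),
      l.foldl (fun acc t => (g t).or acc) acc = (l.reverse.findSome? g).or acc := by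
  intro l
  induction l with
  | nil => intro acc; simp
  | cons t rest ih =>
    intro acc
    simp only [List.foldl_cons, List.reverse_cons, List.findSome?_append, ih]
    cases h : g t with
    | none => cases rest.reverse.findSome? g <;> simp [List.findSome?, h, Option.or]
    | some v => cases rest.reverse.findSome? g <;> simp [List.findSome?, h, Option.or]

-- the dict built by A answers each key with B's reverse-scan result
theorem dict_get_eq_foundB (dim_code : String) (dp vp : List (String × String)) :
    ∀ (tags : List (List (String × String))) (d : PySem.Dict String String),
      (tags.foldl (fun d tag =>
        match pvResolveA tag dp vp with
        | some (k, v) => d.insert k v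
        | none => d) d).get? dim_code
      = (tags.foldl (fun acc tag =>
          (pvGB dim_code dp vp tag).or acc) (d.get? dim_code)) := by
  intro tags
  induction tags with
  | nil => intro d; rfl
  | cons tag rest ih =>
    intro d
    simp only [List.foldl_cons]
    rw [gB_eq_resolveA]
    cases h : pvResolveA tag dp vp with
    | none => simp only [Option.none_or]; exact ih d
    | some kv =>
      obtain ⟨k, v⟩ := kv
      rw [ih (d.insert k v)]
      by_cases hk : k = dim_code
      · simp [hk, Option.or]
      · simp [hk, PySem.Dict.get?_insert, Ne.symm hk, Option.or]

theorem dict_get_eq_foundB' (tags : List (List (String × String))) (dim_code : String) (dp vp : List (String × String)) :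
    (tags.foldl (fun d tag =>
      match pvResolveA tag dp vp with
      | some (k, v) => d.insert k v
      | none => d) PySem.Dict.empty).get? dim_code
    = pvFoundB tags dim_code dp vp := by
  rw [dict_get_eq_foundB, pvFoundB_eq, foldl_lastwins_eq_findSome_reverse]
  have : (PySem.Dict.empty : PySem.Dict String String).get? dim_code = none := rfl
  rw [this, Option.or_none]

-- A's early-return range checks equal B's combined boolean
theorem rangeOkA_eq (vc? : Option String) (rf : List (String × String)) :
    pvRangeOkA vc? rf
      = (match vc? with
         | none => false
         | some v =>
           let f := (List.lookup "from" rf).getD ""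
           let t := (List.lookup "to" rf).getD ""
           (f == "" || decide (f ≤ v)) && (t == "" || decide (v ≤ t))) := by
  cases vc? with
  | none => rfl
  | some v =>
    simp only [pvRangeOkA, pvTruthy]
    by_cases hf : (List.lookup "from" rf).getD "" = "" <;>
      by_cases ht : (List.lookup "to" rf).getD "" = "" <;>
        by_cases h1 : ((List.lookup "from" rf).getD "" : String) ≤ v <;>
          by_cases h2 : v ≤ ((List.lookup "to" rf).getD "" : String) <;>
            simp_all [not_le, not_lt, le_of_lt]

-- A's early-return recursion is List.all
theorem checkFiltersA_eq_all (line_dims : PySem.Dict String String) :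
    ∀ (fs : List (String × List (String × String))),
      pvCheckFiltersA line_dims fs = fs.all (fun p => pvRangeOkA (line_dims.get? p.1) p.2) := by
  intro fs
  induction fs with
  | nil => rfl
  | cons f rest ih =>
    obtain ⟨dc, rf⟩ := f
    simp only [pvCheckFiltersA, List.all_cons, ih]
    by_cases h : pvRangeOkA (line_dims.get? dc) rf = true <;> simp [h]

-- ===== VERDICT (by name: the statement is the Claim_ definition above) =====
theorem line_matches_dimension_filters_py_spec : Claim_equal_line_matches_dimension_filters_py := by
  intro tags fm dp vp _hdom
  show line_matches_dimension_filters_py tags fm dp vp = line_matches_dimension_filters_py_alt tags fm dp vp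
  unfold line_matches_dimension_filters_py line_matches_dimension_filters_py_alt
  cases fm with
  | nil => rfl
  | cons f rest =>
    simp only [List.isEmpty_cons, if_neg, Bool.false_eq_true, not_false_eq_true,
      checkFiltersA_eq_all, dict_get_eq_foundB', rangeOkA_eq]
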